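-- pv_equiv track=rewrite | github.com/amacarrilla/sf-emergency-kg- | scripts/csv_to_rdf.py | get_unit_type
-- ===== SOURCE A (Python) =====
-- UNIT_TYPE_MAP = {
--     "E": "ENGINE",
--     "T": "TRUCK",
--     "M": "MEDIC",
--     "BC": "CHIEF",
--     "RS": "RESCUE_SQUAD",
--     "HM": "HAZMAT",
--     "B": "ENGINE",      # backup engine
--     "AM": "AMBULANCE",
--     "RA": "RESCUE_AMBULANCE",
--     "RC": "RESCUE_CAPTAIN",
--     "SF": "SUPPORT",
--     "FB": "FIREBOAT",
--     "D": "DIVISION_CHIEF",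
--     "C": "CHIEF",
--     "XV": "EXTRA_VEHICLE",
-- }
--
-- def get_unit_type(unit_id):
--     """Determine unit type from unit ID prefix."""
--     if not unit_id:
--         return "UNKNOWN"
--     uid = unit_id.strip().upper()
--
--     # Try longest prefixes first
--     for prefix in sorted(UNIT_TYPE_MAP.keys(), key=len, reverse=True):
--         if uid.startswith(prefix):
--             return UNIT_TYPE_MAP[prefix]
--
--     return "UNKNOWN"
-- ===== SOURCE B (Python) =====
-- UNIT_TYPE_MAP = {
--     "E": "ENGINE",
--     "T": "TRUCK",
--     "M": "MEDIC",
--     "BC": "CHIEF",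
--     "RS": "RESCUE_SQUAD",
--     "HM": "HAZMAT",
--     "B": "ENGINE",      # backup engine
--     "AM": "AMBULANCE",
--     "RA": "RESCUE_AMBULANCE",
--     "RC": "RESCUE_CAPTAIN",
--     "SF": "SUPPORT",
--     "FB": "FIREBOAT",
--     "D": "DIVISION_CHIEF",
--     "C": "CHIEF",
--     "XV": "EXTRA_VEHICLE",
-- }
--
-- def get_unit_type(unit_id):
--     """Determine unit type from unit ID prefix."""
--     if not unit_id:
--         return "UNKNOWN"
--     uid = unit_id.strip().upper()
--     # Every key has length 1 or 2, so two direct lookups (longest first) suffice.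
--     hit = UNIT_TYPE_MAP.get(uid[:2])
--     if hit is not None:
--         return hit
--     hit = UNIT_TYPE_MAP.get(uid[:1])
--     if hit is not None:
--         return hit
--     return "UNKNOWN"
-- ===== Notes on version B (the rewrite author's own statement) =====
-- stated objective: simpler
-- what changed: Replaced the per-call sort of the key list and the linear scan with startswith by two direct dict lookups of the 2-char and then 1-char prefix (every key has length 1 or 2).
import Mathlib
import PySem

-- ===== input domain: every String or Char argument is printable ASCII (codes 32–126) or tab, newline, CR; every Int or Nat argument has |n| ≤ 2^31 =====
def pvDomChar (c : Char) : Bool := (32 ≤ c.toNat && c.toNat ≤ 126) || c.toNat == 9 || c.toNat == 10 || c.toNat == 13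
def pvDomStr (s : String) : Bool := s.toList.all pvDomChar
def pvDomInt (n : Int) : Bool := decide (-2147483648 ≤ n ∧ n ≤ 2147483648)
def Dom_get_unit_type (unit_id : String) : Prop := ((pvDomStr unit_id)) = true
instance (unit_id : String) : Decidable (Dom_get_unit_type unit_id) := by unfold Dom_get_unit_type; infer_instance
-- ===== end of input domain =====

-- B replaces A's per-call sort of the key list and its startswith scan by two direct dict
-- lookups of the 2-char and then 1-char prefix (every key has length 1 or 2); objective: simpler.

-- ===== PORT A =====
def UNIT_TYPE_MAP : PySem.Dict String String :=
  PySem.Dict.ofList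
    [("E","ENGINE"),("T","TRUCK"),("M","MEDIC"),("BC","CHIEF"),("RS","RESCUE_SQUAD"),
     ("HM","HAZMAT"),("B","ENGINE"),("AM","AMBULANCE"),("RA","RESCUE_AMBULANCE"),
     ("RC","RESCUE_CAPTAIN"),("SF","SUPPORT"),("FB","FIREBOAT"),("D","DIVISION_CHIEF"),
     ("C","CHIEF"),("XV","EXTRA_VEHICLE")]

-- 'for prefix in …: if uid.startswith(prefix): return UNIT_TYPE_MAP[prefix]'; the .getD
-- default is unreachable (the prefix is drawn from the dict's own keys, so no KeyError).
def unitTypeLoop (uid : String) : List String → String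
  | [] => "UNKNOWN"
  | p :: rest =>
      if PySem.Str.startswith uid p then (UNIT_TYPE_MAP.get? p).getD "" else unitTypeLoop uid rest

def get_unit_type (unit_id : String) : String :=
  if unit_id = "" then "UNKNOWN"
  else
    unitTypeLoop (PySem.Str.upper (PySem.Str.strip unit_id))
      (PySem.List.sorted UNIT_TYPE_MAP.keys (fun k => PySem.Str.len k) true)

-- ===== PORT B =====
def get_unit_type_alt (unit_id : String) : String :=
  if unit_id = "" then "UNKNOWN"
  else
    let uid := PySem.Str.upper (PySem.Str.strip unit_id)
    match UNIT_TYPE_MAP.get? (PySem.Str.slice uid none (some 2)) with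
    | some v => v
    | none =>
      match UNIT_TYPE_MAP.get? (PySem.Str.slice uid none (some 1)) with
      | some v => v
      | none => "UNKNOWN"

-- ===== PRECONDITION & SPEC =====
def Spec_get_unit_type (unit_id : String) (out : String) : Prop := out = get_unit_type_alt unit_id
instance (unit_id : String) (out : String) : Decidable (Spec_get_unit_type unit_id out) := by unfold Spec_get_unit_type; infer_instance

-- ===== CLAIM (what is proved, stated in full; the proofs are below) =====
def Claim_equal_get_unit_type : Prop := ∀ (unit_id : String), Dom_get_unit_type unit_id → Spec_get_unit_type unit_id (get_unit_type unit_id)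

-- ===== LEMMAS AND PROOFS =====

-- the stable sort by descending length: 2-char keys first, insertion order kept inside each length
theorem sortedKeys_eq :
    PySem.List.sorted UNIT_TYPE_MAP.keys (fun k => PySem.Str.len k) true
      = ["BC","RS","HM","AM","RA","RC","SF","FB","XV","E","T","M","B","D","C"] := by decide

theorem mapmk : UNIT_TYPE_MAP = PySem.Dict.mk
    [("E","ENGINE"),("T","TRUCK"),("M","MEDIC"),("BC","CHIEF"),("RS","RESCUE_SQUAD"),
     ("HM","HAZMAT"),("B","ENGINE"),("AM","AMBULANCE"),("RA","RESCUE_AMBULANCE"),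
     ("RC","RESCUE_CAPTAIN"),("SF","SUPPORT"),("FB","FIREBOAT"),("D","DIVISION_CHIEF"),
     ("C","CHIEF"),("XV","EXTRA_VEHICLE")] := by decide

theorem getD_ite (c : Prop) [Decidable c] (x : String) (y : Option String) (d : String) :
    (if c then some x else y).getD d = if c then x else y.getD d := by split <;> rfl

theorem opt_match_eq_getD (o : Option String) (d : String) :
    (match o with | some v => v | none => d) = o.getD d := by cases o <;> rfl

set_option maxHeartbeats 2000000 in
theorem core_eq (uid : String) :
    unitTypeLoop uid ["BC","RS","HM","AM","RA","RC","SF","FB","XV","E","T","M","B","D","C"]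
      = (match UNIT_TYPE_MAP.get? (PySem.Str.slice uid none (some 2)) with
        | some v => v
        | none =>
          match UNIT_TYPE_MAP.get? (PySem.Str.slice uid none (some 1)) with
          | some v => v
          | none => "UNKNOWN") := by
  rw [mapmk]
  rw [show ((some (2:Int))) = some ((2:Nat):Int) by norm_num,
      show ((some (1:Int))) = some ((1:Nat):Int) by norm_num]
  simp only [unitTypeLoop, PySem.Dict.get?_mk_cons, PySem.Str.startswith_eq,
    PySem.Str.slice, PySem.Chars.slice_eq_listSlice, PySem.List.slice_to_natCast,
    PySem.Chars.startswith_iff]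
  rcases h : uid.toList with _ | ⟨a, _ | ⟨b, t⟩⟩ <;>
    simp [h, beq_iff_eq, String.ext_iff, List.cons_prefix_cons,
      show (UNIT_TYPE_MAP.get? "BC").getD "" = "CHIEF" by decide,
      show (UNIT_TYPE_MAP.get? "RS").getD "" = "RESCUE_SQUAD" by decide,
      show (UNIT_TYPE_MAP.get? "HM").getD "" = "HAZMAT" by decide,
      show (UNIT_TYPE_MAP.get? "AM").getD "" = "AMBULANCE" by decide,
      show (UNIT_TYPE_MAP.get? "RA").getD "" = "RESCUE_AMBULANCE" by decide,
      show (UNIT_TYPE_MAP.get? "RC").getD "" = "RESCUE_CAPTAIN" by decide,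
      show (UNIT_TYPE_MAP.get? "SF").getD "" = "SUPPORT" by decide,
      show (UNIT_TYPE_MAP.get? "FB").getD "" = "FIREBOAT" by decide,
      show (UNIT_TYPE_MAP.get? "XV").getD "" = "EXTRA_VEHICLE" by decide,
      show (UNIT_TYPE_MAP.get? "E").getD "" = "ENGINE" by decide,
      show (UNIT_TYPE_MAP.get? "T").getD "" = "TRUCK" by decide,
      show (UNIT_TYPE_MAP.get? "M").getD "" = "MEDIC" by decide,
      show (UNIT_TYPE_MAP.get? "B").getD "" = "ENGINE" by decide,
      show (UNIT_TYPE_MAP.get? "D").getD "" = "DIVISION_CHIEF" by decide,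
      show (UNIT_TYPE_MAP.get? "C").getD "" = "CHIEF" by decide,
      show ∀ s : String, (PySem.Dict.mk ([] : List (String × String))).get? s = none from fun _ => rfl,
      opt_match_eq_getD, getD_ite] <;>
    split_ifs <;> rfl

-- ===== VERDICT (by name: the statement is the Claim_ definition above) =====
theorem get_unit_type_spec : Claim_equal_get_unit_type := by
  intro unit_id _
  unfold Spec_get_unit_type get_unit_type get_unit_type_alt
  by_cases h : unit_id = ""
  · simp [h]
  · rw [if_neg h, if_neg h, sortedKeys_eq, core_eq]
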